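-- pv_equiv track=rewrite | github.com/tfer2442/myAlgorithm | 프로그래머스/1/17682. ［1차］ 다트 게임/［1차］ 다트 게임.py | calBonus
-- ===== SOURCE A (Python) =====
-- def calBonus(num, bonus):
--     if bonus == False:
--         return num
--
--     for b in bonus:
--         if b == '*':
--             num = num * 2
--         elif b == '#':
--             num = -num
--     return num
-- ===== SOURCE B (Python) =====
-- def calBonus(num, bonus):
--     if bonus == False:
--         return num
--     return num * 2 ** bonus.count('*') * (-1) ** bonus.count('#')
-- ===== Notes on version B (the rewrite author's own statement) =====
-- stated objective: simpler
-- what changed: Replaces the left-to-right mutation loop by a closed form: count '*' and '#' once and return num * 2**stars * (-1)**hashes, valid since doubling and sign flips commute.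
-- outside the precondition, e.g. on calBonus(3, None): A raises TypeError, B raises AttributeError
import Mathlib
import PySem

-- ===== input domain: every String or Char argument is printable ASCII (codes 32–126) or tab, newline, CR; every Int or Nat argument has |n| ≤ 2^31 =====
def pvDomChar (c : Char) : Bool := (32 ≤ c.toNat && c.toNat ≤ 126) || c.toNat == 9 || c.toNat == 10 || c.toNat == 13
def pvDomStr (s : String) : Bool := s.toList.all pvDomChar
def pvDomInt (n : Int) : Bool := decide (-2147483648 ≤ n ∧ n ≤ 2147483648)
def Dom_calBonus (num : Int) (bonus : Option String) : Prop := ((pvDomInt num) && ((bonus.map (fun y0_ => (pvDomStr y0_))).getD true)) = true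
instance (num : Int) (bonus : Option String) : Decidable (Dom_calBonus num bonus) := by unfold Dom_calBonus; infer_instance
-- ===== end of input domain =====

-- B replaces A's left-to-right mutation loop with a closed form counting '*' and '#' (simpler).


-- ===== PORT A =====
-- `bonus == False` is False for every string (and for None), so the guard never fires
-- on admitted inputs; for bonus = None the Python loop raises TypeError (excluded by Pre_).
def calBonus (num : Int) (bonus : Option String) : Int :=
  match bonus with
  | none => 0  -- Python raises TypeError here; outside Pre_
  | some s =>
    s.toList.foldl (fun n b => if b = '*' then n * 2 else if b = '#' then -n else n) num

-- ===== PORT B =====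
def calBonus_alt (num : Int) (bonus : Option String) : Int :=
  match bonus with
  | none => 0  -- Python raises AttributeError here; outside Pre_
  | some s =>
    num * 2 ^ (PySem.Str.count s "*") * (-1) ^ (PySem.Str.count s "#")

-- ===== PRECONDITION & SPEC =====
-- Pre_ excludes bonus = None, on which both Pythons raise (TypeError / AttributeError).
def Pre_calBonus (num : Int) (bonus : Option String) : Prop := bonus ≠ none
instance (num : Int) (bonus : Option String) : Decidable (Pre_calBonus num bonus) := by unfold Pre_calBonus; infer_instance
def pvWitness_calBonus : Int × Option String := (3, some "*#*")

def Spec_calBonus (num : Int) (bonus : Option String) (out : Int) : Prop := out = calBonus_alt num bonus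
instance (num : Int) (bonus : Option String) (out : Int) : Decidable (Spec_calBonus num bonus out) := by unfold Spec_calBonus; infer_instance

-- ===== CLAIM (what is proved, stated in full; the proofs are below) =====
def Claim_equal_calBonus : Prop := ∀ (num : Int) (bonus : Option String), Dom_calBonus num bonus → Pre_calBonus num bonus → Spec_calBonus num bonus (calBonus num bonus)

-- ===== LEMMAS AND PROOFS =====
theorem calBonus_foldl (l : List Char) (num : Int) :
    l.foldl (fun n b => if b = '*' then n * 2 else if b = '#' then -n else n) num
      = num * 2 ^ (l.count '*') * (-1) ^ (l.count '#') := by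
  induction l generalizing num with
  | nil => simp
  | cons b l ih =>
    simp only [List.foldl_cons, ih, List.count_cons]
    by_cases h1 : b = '*'
    · simp [h1, pow_succ]; ring
    · by_cases h2 : b = '#'
      · simp [h2, pow_succ]
      · simp [h1, h2]

theorem count_go_single (c : Char) : ∀ (fuel : Nat) (l : List Char) (acc : Nat),
    l.length ≤ fuel → PySem.Chars.count.go [c] fuel l acc = acc + l.count c := by
  intro fuel
  induction fuel with
  | zero =>
    intro l acc h
    have : l = [] := List.eq_nil_of_length_eq_zero (Nat.le_zero.mp h)
    subst this; simp [PySem.Chars.count.go]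
  | succ fuel ih =>
    intro l acc h
    cases l with
    | nil => simp [PySem.Chars.count.go]
    | cons hd t =>
      simp only [PySem.Chars.count.go]
      by_cases hc : c = hd
      · have hpre : [c].isPrefixOf (hd :: t) = true := by simp [hc, List.isPrefixOf]
        simp only [hpre, if_pos]
        rw [ih _ _ (by simpa using Nat.le_of_succ_le_succ h)]
        simp [hc]
        omega
      · have hpre : [c].isPrefixOf (hd :: t) = false := by
          simp [List.isPrefixOf, hc]
        simp only [hpre, Bool.false_eq_true, if_false]
        rw [ih _ _ (by simpa using Nat.le_of_succ_le_succ h)]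
        simp [Ne.symm hc]

theorem count_single (s : String) (c : Char) :
    PySem.Str.count s (String.ofList [c]) = s.toList.count c := by
  have hto : (String.ofList [c]).toList = [c] := by simp
  simp only [PySem.Str.count, hto, PySem.Chars.count, List.isEmpty_cons]
  rw [if_neg (by simp), count_go_single c s.toList.length s.toList 0 (Nat.le_refl _),
    Nat.zero_add]

-- ===== VERDICT (by name: the statement is the Claim_ definition above) =====
theorem calBonus_spec : Claim_equal_calBonus := by
  intro num bonus _ hpre
  cases bonus with
  | none => exact absurd rfl hpre
  | some s =>
    show calBonus num (some s) = calBonus_alt num (some s)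
    show s.toList.foldl _ num = num * 2 ^ (PySem.Str.count s "*") * (-1) ^ (PySem.Str.count s "#")
    rw [calBonus_foldl]
    have h1 : ("*" : String) = String.ofList ['*'] := rfl
    have h2 : ("#" : String) = String.ofList ['#'] := rfl
    rw [h1, h2, count_single, count_single]
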